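-- pv_equiv track=rewrite | github.com/KotoriFox/smartHomeBot | smartSolar.py | minusCalc
-- ===== SOURCE A (Python) =====
-- cur2pw = [0,1000,1500,2000,2500,3000,3500,4000,4500,5000,5500]
--
-- pw2cur = {0:0,1000:1,1500:2,2000:3,2500:4,3000:5,3500:6,4000:7,4500:8,5000:9,5500:10}
--
-- def minusCalc(pwCur, ndiff):
--    cur = pw2cur[pwCur]
--    if ndiff >= pwCur:
--       return 0
--    while ndiff>0:
--       if cur==0:
--          return 0
--       m = cur2pw[cur]-cur2pw[cur-1]
--       pwCur -= m
--       ndiff -= m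
--       cur -=1
--    return pwCur
-- ===== SOURCE B (Python) =====
-- cur2pw = [0,1000,1500,2000,2500,3000,3500,4000,4500,5000,5500]
--
-- pw2cur = {0:0,1000:1,1500:2,2000:3,2500:4,3000:5,3500:6,4000:7,4500:8,5000:9,5500:10}
--
-- def minusCalc(pwCur, ndiff):
--    cur = pw2cur[pwCur]
--    if ndiff >= pwCur:
--       return 0
--    # largest index with cur2pw[idx] <= pwCur - ndiff, found by binary search
--    target = pwCur - ndiff
--    lo, hi = 0, len(cur2pw)
--    while lo < hi:
--       mid = (lo + hi) // 2
--       if cur2pw[mid] <= target: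
--          lo = mid + 1
--       else:
--          hi = mid
--    idx = lo - 1
--    if idx > cur:
--       idx = cur
--    return cur2pw[idx]
-- ===== Notes on version B (the rewrite author's own statement) =====
-- stated objective: alternative
-- what changed: Replaces A's iterative level-by-level subtraction loop (mutating pwCur and ndiff) with a single binary search for the largest table level not exceeding pwCur - ndiff, capped at the current level.
import Mathlib
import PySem

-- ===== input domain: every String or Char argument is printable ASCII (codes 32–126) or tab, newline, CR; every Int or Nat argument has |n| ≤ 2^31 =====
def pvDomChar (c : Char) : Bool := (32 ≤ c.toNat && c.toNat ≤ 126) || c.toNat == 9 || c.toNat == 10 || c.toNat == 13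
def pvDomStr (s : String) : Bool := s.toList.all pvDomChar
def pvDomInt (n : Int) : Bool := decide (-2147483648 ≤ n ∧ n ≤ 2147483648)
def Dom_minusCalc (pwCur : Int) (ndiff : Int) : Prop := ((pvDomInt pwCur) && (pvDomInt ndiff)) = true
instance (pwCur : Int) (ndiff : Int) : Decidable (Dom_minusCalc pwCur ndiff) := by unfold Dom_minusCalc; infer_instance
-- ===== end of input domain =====

-- B replaces A's level-by-level subtraction loop with a binary search over the sorted level table (alternative decomposition, same exact values).

-- ===== PORT A =====
-- module-level tables
def cur2pwL : List Int := [0,1000,1500,2000,2500,3000,3500,4000,4500,5000,5500]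
def pw2curD : PySem.Dict Int Int :=
  PySem.Dict.ofList [(0,0),(1000,1),(1500,2),(2000,3),(2500,4),(3000,5),(3500,6),(4000,7),(4500,8),(5000,9),(5500,10)]

-- the `while ndiff>0` loop; `cur` decreases by 1 each iteration, so it is the recursion measure
def minusLoopA (pwCur ndiff : Int) : Nat → Int
  | 0 => if ndiff > 0 then 0 else pwCur
  | (c+1) =>
    if ndiff > 0 then
      let m := cur2pwL.getD (c+1) 0 - cur2pwL.getD c 0
      minusLoopA (pwCur - m) (ndiff - m) c
    else pwCur

def minusCalc (pwCur : Int) (ndiff : Int) : Int :=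
  match pw2curD.get? pwCur with
  | none => 0          -- KeyError; excluded by Pre_
  | some cur =>
    if ndiff ≥ pwCur then 0
    else minusLoopA pwCur ndiff cur.toNat   -- all stored cur values are ≥ 0, so toNat is exact

-- ===== PORT B =====
-- bisect_right-style binary search for `target` over cur2pwL
-- fuel is a totality guard only: hi - lo ≤ fuel at every call, so fuel never runs out
def bisectLoop (target : Int) (lo hi : Nat) : Nat → Nat
  | 0 => lo
  | (f+1) =>
    if lo < hi then
      let mid := (lo + hi) / 2
      if cur2pwL.getD mid 0 ≤ target then bisectLoop target (mid+1) hi f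
      else bisectLoop target lo mid f
    else lo

def minusCalc_alt (pwCur : Int) (ndiff : Int) : Int :=
  match pw2curD.get? pwCur with
  | none => 0          -- KeyError; excluded by Pre_
  | some cur =>
    if ndiff ≥ pwCur then 0
    else
      let target := pwCur - ndiff
      let lo := bisectLoop target 0 cur2pwL.length cur2pwL.length
      let idx : Int := (lo : Int) - 1
      let idx := if idx > cur then cur else idx
      PySem.List.pyGetD cur2pwL idx 0   -- idx is always in range here (0 ≤ idx ≤ cur ≤ 10)

-- ===== PRECONDITION & SPEC =====
-- Pre_ excludes exactly the inputs where A raises KeyError: pwCur not a key of pw2cur.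
def Pre_minusCalc (pwCur : Int) (ndiff : Int) : Prop :=
  pwCur ∈ ([0,1000,1500,2000,2500,3000,3500,4000,4500,5000,5500] : List Int)
instance (pwCur : Int) (ndiff : Int) : Decidable (Pre_minusCalc pwCur ndiff) := by unfold Pre_minusCalc; infer_instance
def pvWitness_minusCalc : Int × Int := (2500, 700)

def Spec_minusCalc (pwCur : Int) (ndiff : Int) (out : Int) : Prop := out = minusCalc_alt pwCur ndiff
instance (pwCur : Int) (ndiff : Int) (out : Int) : Decidable (Spec_minusCalc pwCur ndiff out) := by unfold Spec_minusCalc; infer_instance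

-- ===== CLAIM (what is proved, stated in full; the proofs are below) =====
def Claim_equal_minusCalc : Prop := ∀ (pwCur : Int) (ndiff : Int), Dom_minusCalc pwCur ndiff → Pre_minusCalc pwCur ndiff → Spec_minusCalc pwCur ndiff (minusCalc pwCur ndiff)

-- ===== LEMMAS AND PROOFS =====

-- the table is monotone
lemma lk_mono (i j : Nat) (hij : i ≤ j) (hj : j ≤ 10) :
    cur2pwL.getD i 0 ≤ cur2pwL.getD j 0 := by
  have h : ∀ i j : Fin 11, i ≤ j → cur2pwL.getD i.val 0 ≤ cur2pwL.getD j.val 0 := by decide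
  exact h ⟨i, by omega⟩ ⟨j, by omega⟩ hij

-- bisect_right invariant: everything left of the result is ≤ target, everything right is > target
lemma bisect_spec (t : Int) (fuel : Nat) : ∀ (lo hi : Nat), hi - lo ≤ fuel → lo ≤ hi → hi ≤ 11 →
    lo ≤ bisectLoop t lo hi fuel ∧ bisectLoop t lo hi fuel ≤ hi ∧
    (∀ j : Nat, lo ≤ j → j < bisectLoop t lo hi fuel → cur2pwL.getD j 0 ≤ t) ∧
    (∀ j : Nat, bisectLoop t lo hi fuel ≤ j → j < hi → t < cur2pwL.getD j 0) := by
  induction fuel with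
  | zero =>
    intro lo hi h1 h2 h3
    have heq : hi = lo := by omega
    subst heq
    exact ⟨le_refl _, le_refl _, fun j ha hb => by simp [bisectLoop] at hb; omega,
           fun j ha hb => by simp [bisectLoop] at ha; omega⟩
  | succ f ih =>
    intro lo hi h1 h2 h3
    by_cases hlt : lo < hi
    · have hmlt : (lo + hi) / 2 < hi := by omega
      have hmge : lo ≤ (lo + hi) / 2 := by omega
      by_cases hle : cur2pwL.getD ((lo + hi) / 2) 0 ≤ t
      · have hred : bisectLoop t lo hi (f+1) = bisectLoop t ((lo + hi) / 2 + 1) hi f := by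
          simp only [bisectLoop, if_pos hlt, if_pos hle]
        obtain ⟨h1', h2', h3', h4'⟩ := ih ((lo + hi) / 2 + 1) hi (by omega) (by omega) h3
        rw [hred]
        refine ⟨by omega, h2', ?_, h4'⟩
        intro j hj hjr
        by_cases hjm : j ≤ (lo + hi) / 2
        · exact le_trans (lk_mono j ((lo + hi) / 2) hjm (by omega)) hle
        · exact h3' j (by omega) hjr
      · have hred : bisectLoop t lo hi (f+1) = bisectLoop t lo ((lo + hi) / 2) f := by
          simp only [bisectLoop, if_pos hlt, if_neg hle]
        obtain ⟨h1', h2', h3', h4'⟩ := ih lo ((lo + hi) / 2) (by omega) (by omega) (by omega)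
        rw [hred]
        refine ⟨h1', by omega, h3', ?_⟩
        intro j hj hjhi
        by_cases hjm : j < (lo + hi) / 2
        · exact h4' j hj hjm
        · exact lt_of_not_ge (fun hc => hle (le_trans (lk_mono ((lo + hi) / 2) j (by omega) (by omega)) hc))
    · have hred : bisectLoop t lo hi (f+1) = lo := by simp only [bisectLoop, if_neg hlt]
      rw [hred]
      exact ⟨le_refl _, by omega, fun j ha hb => by omega, fun j ha hb => by omega⟩

-- A's loop, started at level c with pwCur = table[c], lands on table[min (r-1) c]
-- whenever r behaves like bisect_right of (table[c] - nd)
lemma loopA_char (c : Nat) (hc : c ≤ 10) (nd : Int) (r : Nat)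
    (hr1 : 1 ≤ r) (hr2 : r ≤ 11)
    (hlow : cur2pwL.getD (r-1) 0 ≤ cur2pwL.getD c 0 - nd)
    (hhigh : r ≤ 10 → cur2pwL.getD c 0 - nd < cur2pwL.getD r 0) :
    minusLoopA (cur2pwL.getD c 0) nd c = cur2pwL.getD (min (r-1) c) 0 := by
  induction c generalizing nd with
  | zero =>
    have h0 : cur2pwL.getD 0 0 = 0 := rfl
    simp only [minusLoopA, Nat.min_zero, h0]
    split <;> rfl
  | succ c ih =>
    by_cases hnd : nd > 0
    · have harg : cur2pwL.getD (c+1) 0 - (cur2pwL.getD (c+1) 0 - cur2pwL.getD c 0)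
          = cur2pwL.getD c 0 := by ring
      have hstep : minusLoopA (cur2pwL.getD (c+1) 0) nd (c+1)
          = minusLoopA (cur2pwL.getD c 0) (nd - (cur2pwL.getD (c+1) 0 - cur2pwL.getD c 0)) c := by
        simp only [minusLoopA, if_pos hnd, harg]
      have hrc : r - 1 ≤ c := by
        by_contra hcon
        push Not at hcon
        have := lk_mono (c+1) (r-1) (by omega) (by omega)
        omega
      rw [hstep, ih (by omega) _ (by
          have : cur2pwL.getD c 0 - (nd - (cur2pwL.getD (c+1) 0 - cur2pwL.getD c 0))
              = cur2pwL.getD (c+1) 0 - nd := by ring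
          rw [this]; exact hlow) (by
          intro h
          have : cur2pwL.getD c 0 - (nd - (cur2pwL.getD (c+1) 0 - cur2pwL.getD c 0))
              = cur2pwL.getD (c+1) 0 - nd := by ring
          rw [this]; exact hhigh h)]
      congr 1
      omega
    · have hrc : c + 1 ≤ r - 1 := by
        by_contra hcon
        push Not at hcon
        have := lk_mono r (c+1) (by omega) hc
        have := hhigh (by omega)
        omega
      have : min (r-1) (c+1) = c + 1 := by omega
      rw [this]
      simp only [minusLoopA, if_neg hnd]

-- both ports at a key of the table agree
lemma full_eq (c : Nat) (hc : c ≤ 10) (pw nd : Int)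
    (hpw : pw = cur2pwL.getD c 0)
    (hget : pw2curD.get? pw = some ((c : Nat) : Int)) :
    minusCalc pw nd = minusCalc_alt pw nd := by
  unfold minusCalc minusCalc_alt
  rw [hget]
  by_cases hge : nd ≥ pw
  · simp [hge]
  · simp only [if_neg hge, Int.toNat_natCast]
    have hlen : cur2pwL.length = 11 := rfl
    rw [hlen]
    obtain ⟨h1, h2, h3, h4⟩ := bisect_spec (pw - nd) 11 0 11 (by omega) (by omega) (by omega)
    set r := bisectLoop (pw - nd) 0 11 11 with hr
    have hpos : 0 < pw - nd := by omega
    have hr1 : 1 ≤ r := by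
      by_contra h
      push Not at h
      have h0 : cur2pwL.getD 0 0 = 0 := rfl
      have := h4 0 (by omega) (by omega)
      omega
    have hlow : cur2pwL.getD (r-1) 0 ≤ cur2pwL.getD c 0 - nd := by
      rw [← hpw]; exact h3 (r-1) (by omega) (by omega)
    have hhigh : r ≤ 10 → cur2pwL.getD c 0 - nd < cur2pwL.getD r 0 := by
      intro h; rw [← hpw]; exact h4 r (le_refl r) (by omega)
    rw [hpw, loopA_char c hc nd r hr1 h2 hlow hhigh]
    have hidx : (if ((r : Int) - 1 > ((c : Nat) : Int)) then ((c : Nat) : Int) else (r : Int) - 1)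
        = ((min (r-1) c : Nat) : Int) := by
      split_ifs <;> omega
    rw [hidx, PySem.List.pyGetD_natCast]

-- ===== VERDICT (by name: the statement is the Claim_ definition above) =====
theorem minusCalc_spec : Claim_equal_minusCalc := by
  intro pwCur ndiff _ hpre
  unfold Spec_minusCalc
  simp only [Pre_minusCalc, List.mem_cons, List.not_mem_nil, or_false] at hpre
  rcases hpre with h|h|h|h|h|h|h|h|h|h|h <;> subst h
  · exact full_eq 0 (by omega) _ ndiff rfl (by decide)
  · exact full_eq 1 (by omega) _ ndiff rfl (by decide)
  · exact full_eq 2 (by omega) _ ndiff rfl (by decide)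
  · exact full_eq 3 (by omega) _ ndiff rfl (by decide)
  · exact full_eq 4 (by omega) _ ndiff rfl (by decide)
  · exact full_eq 5 (by omega) _ ndiff rfl (by decide)
  · exact full_eq 6 (by omega) _ ndiff rfl (by decide)
  · exact full_eq 7 (by omega) _ ndiff rfl (by decide)
  · exact full_eq 8 (by omega) _ ndiff rfl (by decide)
  · exact full_eq 9 (by omega) _ ndiff rfl (by decide)
  · exact full_eq 10 (by omega) _ ndiff rfl (by decide)
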